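-- pv_equiv track=rewrite | github.com/dibyajitKotaiMlDev/Kotai_facematcher | eyeblink_detector.py | blinkchecker
-- ===== SOURCE A (Python) =====
-- def blinkchecker(input_list):
--     has_one = False
--     has_zero = False
--
--     for num in input_list:
--         if num == 1:
--             has_one = True
--         elif num == 0:
--             has_zero = True
--
--         if has_one and has_zero:
--             return True
--
--     return False
-- ===== SOURCE B (Python) =====
-- def blinkchecker(input_list):
--     return 1 in input_list and 0 in input_list
-- ===== Notes on version B (the rewrite author's own statement) =====
-- stated objective: idiomatic
-- what changed: Replaced the flag-tracking single pass with early exit by two independent membership tests (1 in list and 0 in list).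
import Mathlib
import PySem

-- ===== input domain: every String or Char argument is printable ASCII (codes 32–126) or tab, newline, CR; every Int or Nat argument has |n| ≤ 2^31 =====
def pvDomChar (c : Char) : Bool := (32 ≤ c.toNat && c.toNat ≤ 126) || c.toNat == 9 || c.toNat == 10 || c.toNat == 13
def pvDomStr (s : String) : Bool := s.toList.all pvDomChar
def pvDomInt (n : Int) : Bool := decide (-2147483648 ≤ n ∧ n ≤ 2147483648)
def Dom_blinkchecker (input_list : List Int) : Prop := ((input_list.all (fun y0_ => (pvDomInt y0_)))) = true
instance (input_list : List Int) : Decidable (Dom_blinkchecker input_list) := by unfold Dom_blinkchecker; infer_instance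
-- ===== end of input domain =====

-- B replaces A's one-pass flag loop (with early exit) by two independent membership tests: idiomatic, same O(n) cost.

-- ===== PORT A =====
-- loop over the list carrying the two flags; early return when both are set
def blinkcheckerLoop : List Int → Bool → Bool → Bool
  | [], _, _ => false
  | num :: rest, has_one, has_zero =>
    let has_one' := if num = 1 then true else has_one
    let has_zero' := if num ≠ 1 ∧ num = 0 then true else has_zero
    if has_one' && has_zero' then true else blinkcheckerLoop rest has_one' has_zero'

def blinkchecker (input_list : List Int) : Bool :=
  blinkcheckerLoop input_list false false

-- ===== PORT B =====
def blinkchecker_alt (input_list : List Int) : Bool :=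
  input_list.contains 1 && input_list.contains 0

-- ===== PRECONDITION & SPEC =====
def Spec_blinkchecker (input_list : List Int) (out : Bool) : Prop := out = blinkchecker_alt input_list
instance (input_list : List Int) (out : Bool) : Decidable (Spec_blinkchecker input_list out) := by unfold Spec_blinkchecker; infer_instance

-- ===== CLAIM (what is proved, stated in full; the proofs are below) =====
def Claim_equal_blinkchecker : Prop := ∀ (input_list : List Int), Dom_blinkchecker input_list → Spec_blinkchecker input_list (blinkchecker input_list)

-- ===== LEMMAS AND PROOFS =====

-- loop invariant: provided the flags are not both already set, the loop computes
-- "(has_one or 1 occurs) and (has_zero or 0 occurs)"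
theorem blinkcheckerLoop_eq (xs : List Int) (h1 h0 : Bool) (h : ¬ (h1 = true ∧ h0 = true)) :
    blinkcheckerLoop xs h1 h0 = ((h1 || xs.contains 1) && (h0 || xs.contains 0)) := by
  induction xs generalizing h1 h0 with
  | nil =>
    cases h1 <;> cases h0 <;> simp_all [blinkcheckerLoop]
  | cons num rest ih =>
    simp only [blinkcheckerLoop, List.contains_cons]
    by_cases hn1 : num = 1
    · subst hn1
      cases h0 <;>
        simp_all [ih true false (by simp)]
    · by_cases hn0 : num = 0
      · subst hn0
        cases h1 <;>
          simp_all [ih false true (by simp)]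
      · have e1 : ((1 : Int) == num) = false := by simp; omega
        have e0 : ((0 : Int) == num) = false := by simp; omega
        cases h1 <;> cases h0 <;>
          simp [hn1, hn0, e1, e0, ih true false (by simp), ih false true (by simp),
            ih false false (by simp)]

-- ===== VERDICT (by name: the statement is the Claim_ definition above) =====
theorem blinkchecker_spec : Claim_equal_blinkchecker := by
  intro input_list _
  unfold Spec_blinkchecker blinkchecker blinkchecker_alt
  rw [blinkcheckerLoop_eq input_list false false (by simp)]
  simp
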